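-- pv_equiv track=rewrite | github.com/MemonAshfaq/DSA | bitwise/bit_manipulations.py | single_number_sum
-- ===== SOURCE A (Python) =====
-- def single_number_sum(a, r):
--     result = 0
--     for i in range(32):
--         cnt = 0
--         for n in a:
--             cnt += (n >> i) & 1
--         if cnt % r:
--             result |= (1 << i)
--     return result
-- ===== SOURCE B (Python) =====
-- def single_number_sum(a, r):
--     # Radix recursion: peel the low bit of every element with % 2, recurse on the
--     # halved list, and rebuild the answer in Horner form bit + 2 * rest.
--     def go(xs, k):
--         if k == 0:
--             return 0
--         odd = sum(x % 2 for x in xs)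
--         bit = 1 if odd % r else 0
--         return bit + 2 * go([x // 2 for x in xs], k - 1)
--     return go(list(a), 32)
-- ===== Notes on version B (the rewrite author's own statement) =====
-- stated objective: alternative
-- what changed: A runs 32 masked scans over the list (one per bit position), or-ing each decided bit into an accumulator; B is a radix recursion: it peels the low bit of every element with % 2, recurses on the list of halved values (// 2), and rebuilds the result in Horner form bit + 2 * rest, using no bit masks, shifts or or-accumulation.
import Mathlib
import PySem

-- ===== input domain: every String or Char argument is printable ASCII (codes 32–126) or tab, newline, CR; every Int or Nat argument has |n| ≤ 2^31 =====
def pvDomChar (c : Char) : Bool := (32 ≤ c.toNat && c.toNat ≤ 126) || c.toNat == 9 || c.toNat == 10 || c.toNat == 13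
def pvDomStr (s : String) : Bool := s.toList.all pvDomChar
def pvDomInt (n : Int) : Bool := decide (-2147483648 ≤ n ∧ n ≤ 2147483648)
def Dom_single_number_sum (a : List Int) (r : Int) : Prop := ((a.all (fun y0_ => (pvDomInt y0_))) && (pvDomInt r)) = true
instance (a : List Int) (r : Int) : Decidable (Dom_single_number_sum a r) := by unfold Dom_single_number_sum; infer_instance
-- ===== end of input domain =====

-- B replaces A's 32 masked scans with or-accumulation by a radix recursion: peel the low
-- bit of every element with % 2, recurse on the halved list, rebuild as bit + 2*rest
-- (objective: alternative).

-- ===== PORT A =====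
-- A: for each bit i in range(32), scan a counting bit i; set bit i of result if cnt % r is truthy.
def single_number_sum (a : List Int) (r : Int) : Int :=
  (PySem.List.pyRange 0 32 1).foldl (fun result i =>
    let cnt := a.foldl (fun cnt n => cnt + PySem.Int.band (n >>> i.toNat) 1) 0
    if PySem.Int.mod cnt r ≠ 0 then PySem.Int.bor result (1 <<< i.toNat) else result) 0

-- ===== PORT B =====
-- B helper: go(xs, k) of Source B — recursion on the bit budget k over the halved lists.
def pvGo (r : Int) (xs : List Int) (k : Nat) : Int :=
  match k with
  | 0 => 0
  | k + 1 =>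
    let odd := xs.foldl (fun s x => s + PySem.Int.mod x 2) 0
    let bit : Int := if PySem.Int.mod odd r ≠ 0 then 1 else 0
    bit + 2 * pvGo r (xs.map (fun x => PySem.Int.floordiv x 2)) k

def single_number_sum_alt (a : List Int) (r : Int) : Int :=
  pvGo r a 32

-- ===== PRECONDITION & SPEC =====
-- Pre_ excludes r = 0, on which both Pythons raise ZeroDivisionError at `% r`.
def Pre_single_number_sum (a : List Int) (r : Int) : Prop := r ≠ 0
instance (a : List Int) (r : Int) : Decidable (Pre_single_number_sum a r) := by unfold Pre_single_number_sum; infer_instance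
def pvWitness_single_number_sum : List Int × Int := ([2, 2, 3, 2], 3)
def Spec_single_number_sum (a : List Int) (r : Int) (out : Int) : Prop := out = single_number_sum_alt a r
instance (a : List Int) (r : Int) (out : Int) : Decidable (Spec_single_number_sum a r out) := by unfold Spec_single_number_sum; infer_instance

-- ===== CLAIM (what is proved, stated in full; the proofs are below) =====
def Claim_equal_single_number_sum : Prop := ∀ (a : List Int) (r : Int), Dom_single_number_sum a r → Pre_single_number_sum a r → Spec_single_number_sum a r (single_number_sum a r)

-- ===== LEMMAS AND PROOFS =====

-- the per-bit count A computes for bit j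
def pvBitSum (a : List Int) (j : Nat) : Int :=
  a.foldl (fun (cnt : Int) (n : Int) => cnt + PySem.Int.band (n >>> j) 1) 0

-- floor-dividing an arithmetic right shift by 2 is one more shift
theorem pv_fdiv_shift (n : Int) (s : Nat) :
    PySem.Int.floordiv (n >>> s) 2 = n >>> (s + 1) := by
  cases n with
  | ofNat m =>
    show PySem.Int.floordiv ((m >>> s : Nat) : Int) 2 = ((m >>> (s+1) : Nat) : Int)
    rw [Nat.shiftRight_succ]
    exact_mod_cast PySem.Int.floordiv_natCast (m >>> s) 2
  | negSucc m =>
    show (Int.negSucc (m >>> s)).fdiv 2 = Int.negSucc (m >>> (s+1))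
    rw [Nat.shiftRight_succ]
    rfl

-- B's `odd` on the s-times-halved list is A's count for bit s
theorem pv_odd_eq_bitSum (a : List Int) (s : Nat) :
    (a.map (fun n : Int => n >>> s)).foldl (fun acc x => acc + PySem.Int.mod x 2) 0
      = pvBitSum a s := by
  simp only [pvBitSum, List.foldl_map, PySem.Int.band_one]

-- a fresh high bit or-ed into a small nonnegative accumulator is addition (Nat level)
theorem pv_lor_pow (m s : Nat) (h : m < 2^s) : m ||| 2^s = m + 2^s := by
  apply Nat.eq_of_testBit_eq
  intro j
  rw [Nat.add_comm m (2^s), Nat.testBit_or]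
  rcases lt_trichotomy j s with hj | rfl | hj
  · rw [Nat.testBit_two_pow_of_ne (by omega), Nat.testBit_two_pow_add_gt hj]
    simp
  · rw [Nat.testBit_two_pow_add_eq, Nat.testBit_two_pow_self]
    simp [Nat.testBit_lt_two_pow h]
  · rw [Nat.testBit_two_pow_of_ne (by omega)]
    have h1 : m.testBit j = false := Nat.testBit_lt_two_pow (lt_trans h (Nat.pow_lt_pow_right (by norm_num) hj))
    have h2 : (2^s + m).testBit j = false := Nat.testBit_lt_two_pow (by
      have := Nat.pow_le_pow_right (show 1 ≤ 2 by norm_num) (show s+1 ≤ j from hj)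
      calc 2^s + m < 2^s + 2^s := by omega
        _ = 2^(s+1) := by ring
        _ ≤ 2^j := this)
    simp [h1, h2]

-- the same fact on the Int side, in the form A's loop body uses
theorem pv_bor_pow (x : Int) (s : Nat) (h0 : 0 ≤ x) (h1 : x < 2 ^ s) :
    PySem.Int.bor x (1 <<< s) = x + 2 ^ s := by
  obtain ⟨m, rfl⟩ := Int.eq_ofNat_of_zero_le h0
  have hm : m < 2 ^ s := by exact_mod_cast h1
  show PySem.Int.bor (↑m) ((1 <<< s : Nat) : Int) = ↑m + 2 ^ s
  rw [Nat.one_shiftLeft, PySem.Int.bor_natCast, pv_lor_pow m s hm]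
  push_cast
  ring

-- main loop correspondence: A's fold over the remaining bit positions equals
-- result + 2^s * (B's recursion on the s-times-halved list)
theorem pv_main (a : List Int) (r : Int) :
    ∀ (k s : Nat) (result : Int), 0 ≤ result → result < 2 ^ s →
      (List.range' s k).foldl (fun result i =>
        if PySem.Int.mod (pvBitSum a i) r ≠ 0 then PySem.Int.bor result (1 <<< i) else result) result
      = result + 2 ^ s * pvGo r (a.map (fun n : Int => n >>> s)) k := by
  intro k
  induction k with
  | zero => intro s result _ _; simp [pvGo]
  | succ k ih =>
    intro s result hr0 hr1
    rw [List.range'_succ, List.foldl_cons]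
    have hmap : (a.map (fun n : Int => n >>> s)).map (fun x => PySem.Int.floordiv x 2)
        = a.map (fun n : Int => n >>> (s+1)) := by
      rw [List.map_map]
      exact List.map_congr_left (fun n _ => pv_fdiv_shift n s)
    have hrec : pvGo r (a.map (fun n : Int => n >>> s)) (k+1)
        = (if PySem.Int.mod (pvBitSum a s) r ≠ 0 then (1:Int) else 0)
          + 2 * pvGo r (a.map (fun n : Int => n >>> (s+1))) k := by
      simp only [pvGo, pv_odd_eq_bitSum a s, hmap]
    by_cases hc : PySem.Int.mod (pvBitSum a s) r ≠ 0
    · rw [if_pos hc]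
      rw [pv_bor_pow result s hr0 hr1]
      rw [ih (s+1) (result + 2 ^ s) (by positivity) (by rw [pow_succ]; omega)]
      rw [hrec, if_pos hc]
      ring
    · rw [if_neg hc]
      rw [ih (s+1) result hr0 (by rw [pow_succ]; omega)]
      rw [hrec, if_neg hc]
      ring

-- ===== VERDICT (by name: the statement is the Claim_ definition above) =====
theorem single_number_sum_spec : Claim_equal_single_number_sum := by
  intro a r _ _
  unfold Spec_single_number_sum single_number_sum single_number_sum_alt
  have hrange : PySem.List.pyRange 0 32 1 = (List.range' 0 32).map Int.ofNat := by decide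
  rw [hrange, List.foldl_map]
  simp only [Int.shiftRight_natCast_right]
  show (List.range' 0 32).foldl (fun result (i : Nat) =>
      if PySem.Int.mod (pvBitSum a i) r ≠ 0 then PySem.Int.bor result (1 <<< i) else result) 0
    = pvGo r a 32
  rw [pv_main a r 32 0 0 le_rfl (by norm_num)]
  have hid : a.map (fun n : Int => n >>> (0 : Nat)) = a := by simp
  rw [hid]
  ring
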